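-- pv_equiv track=rewrite | github.com/MilenMMinev/hackbulgaria-week0 | is_number_balanced/solution.py | sum_first
-- ===== SOURCE A (Python) =====
-- def count_digits(n):
-- 	sum = 0
-- 	while n != 0:
-- 		n = n // 10
-- 		sum = sum + 1
-- 	return sum
--
-- def sum_first(n):
-- 	sum = 0
-- 	if count_digits(n) % 2 == 0:
-- 		n = n // 10 ** (count_digits(n) // 2)
-- 		while n != 0:
-- 			sum = sum + n % 10
-- 			n = n // 10
-- 	if count_digits(n) % 2 == 1:
-- 		n = n // 10 ** ((count_digits(n) // 2)+1)
-- 		while n != 0: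
-- 			sum = sum + n % 10
-- 			n = n // 10
-- 	return sum
-- ===== SOURCE B (Python) =====
-- def sum_first(n):
--     digits = []
--     while n != 0:
--         digits.append(n % 10)
--         n //= 10
--     return sum(digits[(len(digits) + 1) // 2:])
-- ===== Notes on version B (the rewrite author's own statement) =====
-- stated objective: simpler
-- what changed: B collects the digits once into a list (least-significant first) and returns the sum of one slice, replacing A's three digit-count/divide loops and two parity branches with a single build-then-slice-and-sum pass.
import Mathlib
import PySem

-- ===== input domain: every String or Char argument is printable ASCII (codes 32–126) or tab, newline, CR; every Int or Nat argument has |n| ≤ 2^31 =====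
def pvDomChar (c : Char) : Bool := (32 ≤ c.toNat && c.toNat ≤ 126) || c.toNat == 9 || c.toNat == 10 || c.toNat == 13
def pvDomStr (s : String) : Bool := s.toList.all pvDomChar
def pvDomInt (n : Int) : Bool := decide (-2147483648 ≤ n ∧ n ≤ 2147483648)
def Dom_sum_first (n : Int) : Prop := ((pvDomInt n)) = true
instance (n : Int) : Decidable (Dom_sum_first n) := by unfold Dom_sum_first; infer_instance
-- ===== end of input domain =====

-- B builds the digit list once and sums one slice instead of A's repeated count/divide loops; objective: simpler.
-- Pre_ restricts to nonnegative n: on negative n both Pythons loop forever (floor division keeps n negative).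


-- ===== PORT A =====
-- while n != 0: n //= 10; sum += 1  (fuel n.natAbs+1 suffices for every n ≥ 0; the Python loop diverges for n < 0, outside Pre_)
def cdAux (fuel : Nat) (n sum : Int) : Int :=
  match fuel with
  | 0 => sum
  | f + 1 => if n ≠ 0 then cdAux f (PySem.Int.floordiv n 10) (sum + 1) else sum

def count_digits (n : Int) : Int := cdAux (n.natAbs + 1) n 0

-- while n != 0: sum += n % 10; n //= 10  — returns the final (sum, n)
def loopAux (fuel : Nat) (sum n : Int) : Int × Int :=
  match fuel with
  | 0 => (sum, n)
  | f + 1 => if n ≠ 0 then loopAux f (sum + PySem.Int.mod n 10) (PySem.Int.floordiv n 10) else (sum, n)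

def runLoop (sum n : Int) : Int × Int := loopAux (n.natAbs + 1) sum n

-- .toNat on the exponent is exact: count_digits never returns a negative value
def sum_first (n : Int) : Int :=
  let sum : Int := 0
  let s1 :=
    if PySem.Int.mod (count_digits n) 2 = 0 then
      runLoop sum (PySem.Int.floordiv n (10 ^ (PySem.Int.floordiv (count_digits n) 2).toNat))
    else (sum, n)
  let sum := s1.1
  let n := s1.2
  let s2 :=
    if PySem.Int.mod (count_digits n) 2 = 1 then
      runLoop sum (PySem.Int.floordiv n (10 ^ (PySem.Int.floordiv (count_digits n) 2 + 1).toNat))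
    else (sum, n)
  s2.1

-- ===== PORT B =====
-- while n != 0: digits.append(n % 10); n //= 10
def digitsLoop (fuel : Nat) (n : Int) (L : List Int) : List Int :=
  match fuel with
  | 0 => L
  | f + 1 => if n ≠ 0 then digitsLoop f (PySem.Int.floordiv n 10) (L ++ [PySem.Int.mod n 10]) else L

def sum_first_alt (n : Int) : Int :=
  let L := digitsLoop (n.natAbs + 1) n []
  (PySem.List.slice L (some (PySem.Int.floordiv ((L.length : Int) + 1) 2)) none).sum

-- ===== PRECONDITION & SPEC =====
-- Pre_ excludes n < 0, on which A's while loop never terminates (n // 10 stays negative), so A returns nothing there.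
def Pre_sum_first (n : Int) : Prop := 0 ≤ n
instance (n : Int) : Decidable (Pre_sum_first n) := by unfold Pre_sum_first; infer_instance
def pvWitness_sum_first : Int := 1234

def Spec_sum_first (n : Int) (out : Int) : Prop := out = sum_first_alt n
instance (n : Int) (out : Int) : Decidable (Spec_sum_first n out) := by unfold Spec_sum_first; infer_instance

-- ===== CLAIM (what is proved, stated in full; the proofs are below) =====
def Claim_equal_sum_first : Prop := ∀ (n : Int), Dom_sum_first n → Pre_sum_first n → Spec_sum_first n (sum_first n)

-- ===== LEMMAS AND PROOFS =====

lemma digits_len_le (m : Nat) : (Nat.digits 10 m).length ≤ m + 1 :=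
  (Nat.digits_length_le_iff (by norm_num) m).2
    (lt_of_lt_of_le (Nat.lt_pow_self (by norm_num)) (Nat.pow_le_pow_right (by norm_num) (Nat.le_succ m)))

lemma fdiv_cast (m : Nat) : PySem.Int.floordiv (m : Int) 10 = ((m / 10 : Nat) : Int) := by
  exact_mod_cast PySem.Int.floordiv_natCast m 10

lemma fmod_cast (m : Nat) : PySem.Int.mod (m : Int) 10 = ((m % 10 : Nat) : Int) := by
  exact_mod_cast PySem.Int.mod_natCast m 10

lemma cdAux_eq : ∀ (fuel m : Nat) (s : Int), (Nat.digits 10 m).length ≤ fuel →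
    cdAux fuel (m : Int) s = s + ((Nat.digits 10 m).length : Int) := by
  intro fuel
  induction fuel with
  | zero =>
    intro m s h
    have hm : m = 0 := by
      simpa using Nat.digits_eq_nil_iff_eq_zero.mp
        (List.eq_nil_of_length_eq_zero (Nat.le_zero.mp h))
    subst hm; simp [cdAux]
  | succ f ih =>
    intro m s h
    by_cases hm : m = 0
    · subst hm; simp [cdAux]
    · have hd := Nat.digits_def' (by norm_num : 1 < 10) (Nat.pos_of_ne_zero hm)
      have hne : (m : Int) ≠ 0 := by exact_mod_cast hm
      rw [cdAux, if_pos hne, fdiv_cast,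
        ih (m / 10) (s + 1) (by rw [hd] at h; simpa using Nat.lt_succ_iff.mp h), hd]
      simp; ring

lemma count_digits_eq (m : Nat) : count_digits (m : Int) = ((Nat.digits 10 m).length : Int) := by
  have : (m : Int).natAbs = m := Int.natAbs_natCast m
  rw [count_digits, this, cdAux_eq (m + 1) m 0 (digits_len_le m)]
  simp

lemma loopAux_eq : ∀ (fuel m : Nat) (s : Int), (Nat.digits 10 m).length ≤ fuel →
    loopAux fuel s (m : Int) = (s + (((Nat.digits 10 m).map (fun d : Nat => (d : Int))).sum), 0) := by
  intro fuel
  induction fuel with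
  | zero =>
    intro m s h
    have hm : m = 0 := by
      simpa using Nat.digits_eq_nil_iff_eq_zero.mp
        (List.eq_nil_of_length_eq_zero (Nat.le_zero.mp h))
    subst hm; simp [loopAux]
  | succ f ih =>
    intro m s h
    by_cases hm : m = 0
    · subst hm; simp [loopAux]
    · have hd := Nat.digits_def' (by norm_num : 1 < 10) (Nat.pos_of_ne_zero hm)
      have hne : (m : Int) ≠ 0 := by exact_mod_cast hm
      rw [loopAux, if_pos hne, fdiv_cast, fmod_cast,
        ih (m / 10) _ (by rw [hd] at h; simpa using Nat.lt_succ_iff.mp h), hd]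
      simp; ring

lemma runLoop_eq (m : Nat) (s : Int) :
    runLoop s (m : Int) = (s + (((Nat.digits 10 m).map (fun d : Nat => (d : Int))).sum), 0) := by
  rw [runLoop, Int.natAbs_natCast, loopAux_eq (m + 1) m s (digits_len_le m)]

lemma digitsLoop_eq : ∀ (fuel m : Nat) (L : List Int), (Nat.digits 10 m).length ≤ fuel →
    digitsLoop fuel (m : Int) L = L ++ (Nat.digits 10 m).map (fun d : Nat => (d : Int)) := by
  intro fuel
  induction fuel with
  | zero =>
    intro m L h
    have hm : m = 0 := by
      simpa using Nat.digits_eq_nil_iff_eq_zero.mp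
        (List.eq_nil_of_length_eq_zero (Nat.le_zero.mp h))
    subst hm; simp [digitsLoop]
  | succ f ih =>
    intro m L h
    by_cases hm : m = 0
    · subst hm; simp [digitsLoop]
    · have hd := Nat.digits_def' (by norm_num : 1 < 10) (Nat.pos_of_ne_zero hm)
      have hne : (m : Int) ≠ 0 := by exact_mod_cast hm
      rw [digitsLoop, if_pos hne, fdiv_cast, fmod_cast,
        ih (m / 10) _ (by rw [hd] at h; simpa using Nat.lt_succ_iff.mp h), hd]
      simp

-- digits of a quotient by a power of the base are a drop of the digits
lemma digits_div_pow : ∀ (k m : Nat), Nat.digits 10 (m / 10 ^ k) = (Nat.digits 10 m).drop k := by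
  intro k
  induction k with
  | zero => intro m; simp
  | succ k ih =>
    intro m
    have h1 : m / 10 ^ (k + 1) = (m / 10) / 10 ^ k := by
      rw [Nat.div_div_eq_div_mul, pow_succ, mul_comm]
    have h2 : Nat.digits 10 (m / 10) = (Nat.digits 10 m).drop 1 := by
      by_cases hm : m = 0
      · subst hm; simp
      · rw [Nat.digits_def' (by norm_num : 1 < 10) (Nat.pos_of_ne_zero hm)]; simp
    rw [h1, ih, h2, List.drop_drop, Nat.add_comm]

theorem sum_first_spec : Claim_equal_sum_first := by
  intro n _ hpre
  have hn : ((n.toNat : Nat) : Int) = n := Int.toNat_of_nonneg hpre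
  set m := n.toNat with hm
  unfold Spec_sum_first
  set D := Nat.digits 10 m with hD
  set d := D.length with hd
  have hB : sum_first_alt n = ((D.drop ((d + 1) / 2)).map (fun x : Nat => (x : Int))).sum := by
    rw [sum_first_alt, ← hn, Int.natAbs_natCast,
      digitsLoop_eq (m + 1) m [] (digits_len_le m)]
    simp only [List.nil_append, ← hD]
    have hlen : ((D.map (fun x : Nat => (x : Int))).length : Int) + 1 = ((d + 1 : Nat) : Int) := by
      simp [hd]
    rw [hlen]
    have hstart : PySem.Int.floordiv ((d + 1 : Nat) : Int) 2 = (((d + 1) / 2 : Nat) : Int) := by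
      exact_mod_cast PySem.Int.floordiv_natCast (d + 1) 2
    rw [hstart, PySem.List.slice_from _ (by positivity), Int.toNat_natCast, ← List.map_drop]
  have hcd : count_digits n = (d : Int) := by rw [← hn, count_digits_eq]
  have hhalf : PySem.Int.floordiv (d : Int) 2 = ((d / 2 : Nat) : Int) := by
    exact_mod_cast PySem.Int.floordiv_natCast d 2
  have hquot : ∀ k : Nat, PySem.Int.floordiv n (10 ^ k) = ((m / 10 ^ k : Nat) : Int) := by
    intro k
    rw [← hn]
    have h10 : ((10 : Nat) ^ k : Int) = (10 : Int) ^ k := by push_cast; ring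
    rw [← h10]
    exact_mod_cast PySem.Int.floordiv_natCast m (10 ^ k)
  have hcd0 : count_digits (0 : Int) = 0 := by
    have := count_digits_eq 0; simpa using this
  rcases Nat.even_or_odd d with he | ho
  · have hpar : d % 2 = 0 := Nat.even_iff.mp he
    have hk : (d + 1) / 2 = d / 2 := by omega
    have e2 : PySem.Int.mod (count_digits n) 2 = 0 := by
      rw [hcd]
      have : PySem.Int.mod (d : Int) 2 = ((d % 2 : Nat) : Int) := by
        exact_mod_cast PySem.Int.mod_natCast d 2
      rw [this, hpar]; rfl
    have e1 : (PySem.Int.floordiv (count_digits n) 2).toNat = d / 2 := by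
      rw [hcd, hhalf, Int.toNat_natCast]
    have e3 : runLoop 0 (PySem.Int.floordiv n (10 ^ (d / 2))) =
        (((D.drop (d / 2)).map (fun x : Nat => (x : Int))).sum, 0) := by
      rw [hquot (d / 2), runLoop_eq, digits_div_pow, ← hD]; ring_nf
    have hm0 : PySem.Int.mod (0:Int) 2 = 0 := by decide
    simp only [sum_first, e2, e1, e3, if_true, hcd0, hm0]
    rw [if_neg (show ¬((0:Int) = 1) by norm_num)]
    rw [hB, hk]
  · have hpar : d % 2 = 1 := Nat.odd_iff.mp ho
    have hk : (d + 1) / 2 = d / 2 + 1 := by omega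
    have e2 : PySem.Int.mod (count_digits n) 2 = 1 := by
      rw [hcd]
      have : PySem.Int.mod (d : Int) 2 = ((d % 2 : Nat) : Int) := by
        exact_mod_cast PySem.Int.mod_natCast d 2
      rw [this, hpar]; rfl
    have e1 : (PySem.Int.floordiv (count_digits n) 2 + 1).toNat = d / 2 + 1 := by
      rw [hcd, hhalf]; omega
    have e3 : runLoop 0 (PySem.Int.floordiv n (10 ^ (d / 2 + 1))) =
        (((D.drop (d / 2 + 1)).map (fun x : Nat => (x : Int))).sum, 0) := by
      rw [hquot (d / 2 + 1), runLoop_eq, digits_div_pow, ← hD]; ring_nf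
    simp only [sum_first, e2]
    rw [if_neg (show ¬((1:Int) = 0) by norm_num)]
    simp only [e2, e1, e3]
    simp only [if_true]
    rw [hB, hk]
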